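-- pv_equiv track=rewrite | github.com/dcizma1/testing-graph-metrizability | CheckSystem.py | indexPaths
-- ===== SOURCE A (Python) =====
-- def indexPaths(nonIndPaths):
--     indPaths = {}
--     for p in nonIndPaths:
--         if p[0] > p[-1]:
--             key = (p[0], p[-1])
--             if  key in indPaths:
--                 indPaths[key].append(p)
--             else:
--                 indPaths[key] = []
--                 indPaths[key].append(p)
--     return indPaths
-- ===== SOURCE B (Python) =====
-- def indexPaths(nonIndPaths):
--     qual = [p for p in nonIndPaths if p[0] > p[-1]]
--     keys = dict.fromkeys((p[0], p[-1]) for p in qual)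
--     return {k: [p for p in qual if (p[0], p[-1]) == k] for k in keys}
-- ===== Notes on version B (the rewrite author's own statement) =====
-- stated objective: idiomatic
-- what changed: Replaced the incremental dict-mutation loop (contains-check, insert-empty, append) by a declarative pipeline: filter the qualifying paths once, take the ordered-deduplicated list of (first,last) keys, and build each group by a per-key filter of the qualifying list; Pre_ excludes inputs containing an empty path, on which A raises IndexError at p[0].
import Mathlib
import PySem

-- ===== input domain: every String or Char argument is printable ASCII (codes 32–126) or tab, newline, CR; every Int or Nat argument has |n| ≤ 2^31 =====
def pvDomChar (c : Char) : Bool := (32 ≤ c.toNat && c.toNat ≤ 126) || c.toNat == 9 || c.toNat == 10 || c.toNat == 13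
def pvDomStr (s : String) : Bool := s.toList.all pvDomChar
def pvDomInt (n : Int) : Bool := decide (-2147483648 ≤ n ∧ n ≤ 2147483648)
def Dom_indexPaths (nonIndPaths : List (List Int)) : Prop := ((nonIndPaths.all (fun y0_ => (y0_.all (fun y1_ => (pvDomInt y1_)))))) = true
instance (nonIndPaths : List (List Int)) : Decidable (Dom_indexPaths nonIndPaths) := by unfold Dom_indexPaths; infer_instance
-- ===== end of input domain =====

-- B groups by a filter/dedup/per-key-filter pipeline instead of A's incremental dict mutation (idiomatic; not faster).
-- Pre_ excludes inputs containing an empty path, on which A (and B) raise IndexError at p[0].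

-- ===== PORT A =====
-- Literal transliteration of A: a dict accumulated left to right; p[0]/p[-1] via pyGet?
-- (none = IndexError on an empty path, excluded by Pre_; the loop then leaves the dict unchanged).
def indexPaths (nonIndPaths : List (List Int)) : List (Int × Int × List (List Int)) :=
  let indPaths : PySem.Dict (Int × Int) (List (List Int)) :=
    nonIndPaths.foldl (fun d p =>
      match PySem.List.pyGet? p 0, PySem.List.pyGet? p (-1) with
      | some a, some b =>
        if a > b then
          let key : Int × Int := (a, b)
          if d.contains key then
            d.modify key [] (fun l => l ++ [p])            -- indPaths[key].append(p)
          else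
            (d.insert key []).modify key [] (fun l => l ++ [p])  -- indPaths[key] = []; indPaths[key].append(p)
        else d
      | _, _ => d) PySem.Dict.empty
  indPaths.items.map (fun kv => (kv.1.1, kv.1.2, kv.2))

-- ===== PORT B =====
-- helpers shared by B's port: p's endpoint key and the qualifying test p[0] > p[-1]
-- (pyGetD with default 0: Pre_ guarantees p ≠ [], where it equals p[0] / p[-1] exactly).
def pvKey (p : List Int) : Int × Int := (PySem.List.pyGetD p 0 0, PySem.List.pyGetD p (-1) 0)
def pvQual (p : List Int) : Bool := PySem.List.pyGetD p 0 0 > PySem.List.pyGetD p (-1) 0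

-- Transliteration of Source B: qual = filter; keys = dict.fromkeys (= PySem.List.dedup, first
-- occurrences in order); the dict comprehension over the distinct keys is the association
-- list of (key, per-key filter of qual) in that key order.
def indexPaths_alt (nonIndPaths : List (List Int)) : List (Int × Int × List (List Int)) :=
  let qual := nonIndPaths.filter pvQual
  let keys := PySem.List.dedup (qual.map pvKey)
  keys.map (fun k => (k.1, k.2, qual.filter (fun p => pvKey p == k)))

-- ===== PRECONDITION & SPEC =====
-- Pre_ excludes inputs containing an empty path: there A raises IndexError at p[0].
def Pre_indexPaths (nonIndPaths : List (List Int)) : Prop := ∀ p ∈ nonIndPaths, p ≠ []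
instance (nonIndPaths : List (List Int)) : Decidable (Pre_indexPaths nonIndPaths) := by unfold Pre_indexPaths; infer_instance
def pvWitness_indexPaths : List (List Int) := [[2, 1], [1, 2], [3, 0, 1], [2, 1]]
def Spec_indexPaths (nonIndPaths : List (List Int)) (out : List (Int × Int × List (List Int))) : Prop := out = indexPaths_alt nonIndPaths
instance (nonIndPaths : List (List Int)) (out : List (Int × Int × List (List Int))) : Decidable (Spec_indexPaths nonIndPaths out) := by unfold Spec_indexPaths; infer_instance

-- ===== CLAIM (what is proved, stated in full; the proofs are below) =====
def Claim_equal_indexPaths : Prop := ∀ (nonIndPaths : List (List Int)), Dom_indexPaths nonIndPaths → Pre_indexPaths nonIndPaths → Spec_indexPaths nonIndPaths (indexPaths nonIndPaths)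

-- ===== LEMMAS AND PROOFS =====

-- On a nonempty list, pyGet? at 0 / -1 returns some of the pyGetD value (default irrelevant).
lemma pvGet0 (p : List Int) (h : p ≠ []) : PySem.List.pyGet? p 0 = some (PySem.List.pyGetD p 0 0) := by
  cases p with
  | nil => exact absurd rfl h
  | cons a t => simp [PySem.List.pyGet?, PySem.List.pyGetD, PySem.List.pyIdx?]

lemma pvGetLast (p : List Int) (h : p ≠ []) : PySem.List.pyGet? p (-1) = some (PySem.List.pyGetD p (-1) 0) := by
  cases p with
  | nil => exact absurd rfl h
  | cons a t =>
    simp [PySem.List.pyGet?, PySem.List.pyGetD, PySem.List.pyIdx?]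

lemma pvDictExt {κ ν : Type} (a b : PySem.Dict κ ν) (h : a.items = b.items) : a = b := by
  cases a; cases b; simpa using h

lemma pvInsertNilModify {κ ν : Type} [BEq κ] [LawfulBEq κ] (d : PySem.Dict κ ν) (k : κ)
    (v0 : ν) (f : ν → ν) (h : d.contains k = false) :
    (d.insert k v0).modify k v0 f = d.modify k v0 f := by
  unfold PySem.Dict.modify
  rw [PySem.Dict.getD_insert_self, PySem.Dict.getD_of_not_contains d v0 h]
  apply pvDictExt
  rw [PySem.Dict.items_insert_of_contains _ _ (PySem.Dict.contains_insert_self d k v0),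
    PySem.Dict.items_insert_of_not_contains _ _ h,
    PySem.Dict.items_insert_of_not_contains _ _ h]
  have hnk : ∀ p ∈ d.items, (p.1 == k) = false := by
    intro p hp
    have := h
    simp [PySem.Dict.contains, List.any_eq_false] at this
    simpa using this p.1 p.2 hp
  have hid : ∀ p ∈ d.items, (if (p.1 == k) = true then (k, f v0) else p) = p := by
    intro p hp; simp [hnk p hp]
  rw [List.map_append, List.map_congr_left hid]
  simp

lemma pvGetDMap {κ : Type} [BEq κ] [LawfulBEq κ] (ks : List κ) (v : κ → List (List Int)) (k : κ)
    (hk : k ∈ ks) :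
    (PySem.Dict.mk (κ := κ) (ks.map (fun k' => (k', v k')))).getD k [] = v k := by
  induction ks with
  | nil => simp at hk
  | cons a t ih =>
    by_cases hak : a = k
    · subst hak
      simp [PySem.Dict.getD, PySem.Dict.get?]
    · have hkt : k ∈ t := by
        rcases List.mem_cons.1 hk with h | h
        · exact absurd h.symm hak
        · exact h
      have := ih hkt
      simp [PySem.Dict.getD, PySem.Dict.get?, hak] at this ⊢
      simpa [hak] using this

lemma pvContainsMap {κ : Type} [BEq κ] [LawfulBEq κ] (ks : List κ) (v : κ → List (List Int)) (k : κ) :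
    (PySem.Dict.mk (κ := κ) (ks.map (fun k' => (k', v k')))).contains k = decide (k ∈ ks) := by
  induction ks with
  | nil => simp [PySem.Dict.contains]
  | cons a t ih =>
    simp only [PySem.Dict.contains, List.map_cons, List.any_cons] at ih ⊢
    by_cases hak : a = k
    · simp [hak]
    · have hka : ¬ k = a := fun h => hak h.symm
      simp [hak, hka, ih]

lemma pvGroupFold (qs : List (List Int)) :
    qs.foldl (fun d p => d.modify (pvKey p) [] (fun l => l ++ [p])) PySem.Dict.empty
      = PySem.Dict.mk ((PySem.List.dedup (qs.map pvKey)).map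
          (fun k => (k, qs.filter (fun p => pvKey p == k)))) := by
  induction qs using List.reverseRecOn with
  | nil => rfl
  | append_singleton qs p ih =>
    rw [List.foldl_append, List.foldl_cons, List.foldl_nil, ih]
    have hded : PySem.List.dedup ((qs ++ [p]).map pvKey)
        = PySem.Set.add (PySem.List.dedup (qs.map pvKey)) (pvKey p) := by
      simp [PySem.List.dedup, PySem.Set.ofList, List.foldl_append]
    rw [hded]
    have hfil : ∀ k, (qs ++ [p]).filter (fun q => pvKey q == k)
        = qs.filter (fun q => pvKey q == k) ++ (if pvKey p == k then [p] else []) := by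
      intro k; simp [List.filter_append, List.filter_cons]
    by_cases hmem : pvKey p ∈ PySem.List.dedup (qs.map pvKey)
    · have hcon : (PySem.Dict.mk ((PySem.List.dedup (qs.map pvKey)).map
          (fun k => (k, qs.filter (fun q => pvKey q == k))))).contains (pvKey p) = true := by
        rw [pvContainsMap]; exact decide_eq_true hmem
      have hadd : PySem.Set.add (PySem.List.dedup (qs.map pvKey)) (pvKey p)
          = PySem.List.dedup (qs.map pvKey) := by
        have hc : (PySem.List.dedup (qs.map pvKey)).contains (pvKey p) = true :=
          List.elem_eq_true_of_mem hmem
        simp only [PySem.Set.add, PySem.Set.contains, hc, if_true]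
      rw [hadd]
      apply pvDictExt
      unfold PySem.Dict.modify
      rw [PySem.Dict.items_insert_of_contains _ _ hcon]
      rw [show (PySem.Dict.mk ((PySem.List.dedup (qs.map pvKey)).map
            (fun k => (k, qs.filter (fun q => pvKey q == k))))).getD (pvKey p) []
          = qs.filter (fun q => pvKey q == pvKey p) from pvGetDMap _ _ _ hmem]
      simp only [List.map_map]
      apply List.map_congr_left
      intro k hkmem
      by_cases hk : k = pvKey p
      · subst hk; simp [hfil]
      · have hk' : ¬ pvKey p = k := fun h => hk h.symm
        simp [Function.comp, hk, hk', hfil]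
    · have hcon : (PySem.Dict.mk ((PySem.List.dedup (qs.map pvKey)).map
          (fun k => (k, qs.filter (fun q => pvKey q == k))))).contains (pvKey p) = false := by
        rw [pvContainsMap]; exact decide_eq_false hmem
      have hadd : PySem.Set.add (PySem.List.dedup (qs.map pvKey)) (pvKey p)
          = PySem.List.dedup (qs.map pvKey) ++ [pvKey p] := by
        have hc : (PySem.List.dedup (qs.map pvKey)).contains (pvKey p) = false := by
          simpa using hmem
        simp only [PySem.Set.add, PySem.Set.contains, hc, Bool.false_eq_true, if_false]
      rw [hadd]
      apply pvDictExt
      unfold PySem.Dict.modify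
      rw [PySem.Dict.getD_of_not_contains _ _ hcon,
        PySem.Dict.items_insert_of_not_contains _ _ hcon]
      have hnotin : pvKey p ∉ qs.map pvKey := by
        intro h; exact hmem ((PySem.List.mem_dedup _ _).2 h)
      have hnil : qs.filter (fun q => pvKey q == pvKey p) = [] := by
        rw [List.filter_eq_nil_iff]
        intro q hq
        simp only [beq_iff_eq]
        intro h
        exact hnotin (h ▸ List.mem_map_of_mem (f := pvKey) hq)
      simp only [List.map_append, List.map_cons, List.map_nil]
      congr 1
      · apply List.map_congr_left
        intro k hkmem
        have hkK : k ∈ qs.map pvKey := (PySem.List.mem_dedup _ _).1 hkmem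
        have hne : (pvKey p == k) = false := by
          simp only [beq_eq_false_iff_ne]
          intro h
          exact hnotin (h ▸ hkK)
        simp [hfil, hne]
      · simp [hfil, hnil]

-- (bridge: A's fold over the raw list equals the simple grouping fold over the filtered list)
lemma pvFoldBridge (l : List (List Int)) (hPre : ∀ p ∈ l, p ≠ [])
    (d : PySem.Dict (Int × Int) (List (List Int))) :
    l.foldl (fun d p =>
      match PySem.List.pyGet? p 0, PySem.List.pyGet? p (-1) with
      | some a, some b =>
        if a > b then
          if d.contains (a, b) then d.modify (a, b) [] (fun l => l ++ [p])
          else (d.insert (a, b) []).modify (a, b) [] (fun l => l ++ [p])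
        else d
      | _, _ => d) d
    = (l.filter pvQual).foldl (fun d p => d.modify (pvKey p) [] (fun l => l ++ [p])) d := by
  induction l generalizing d with
  | nil => simp
  | cons p t ih =>
    have hp : p ≠ [] := hPre p (by simp)
    have ht : ∀ q ∈ t, q ≠ [] := fun q hq => hPre q (by simp [hq])
    rw [List.foldl_cons, pvGet0 p hp, pvGetLast p hp]
    have hkey : (PySem.List.pyGetD p 0 0, PySem.List.pyGetD p (-1) 0) = pvKey p := rfl
    by_cases hq : pvQual p = true
    · have hq' : PySem.List.pyGetD p 0 0 > PySem.List.pyGetD p (-1) 0 := by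
        simpa [pvQual] using hq
      simp only [List.filter_cons, hq, if_pos hq', ite_true, List.foldl_cons, hkey]
      by_cases hc : PySem.Dict.contains d (pvKey p) = true
      · rw [if_pos hc, ih ht]
      · rw [if_neg (by simpa using hc),
          pvInsertNilModify _ _ _ _ (by simpa using hc), ih ht]
    · have hq' : ¬ (PySem.List.pyGetD p 0 0 > PySem.List.pyGetD p (-1) 0) := by
        simpa [pvQual] using hq
      have hqf : pvQual p = false := by simpa using hq
      simp only [List.filter_cons, hqf, Bool.false_eq_true, if_false, if_neg hq']
      exact ih ht d

-- ===== VERDICT (by name: the statement is the Claim_ definition above) =====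
theorem indexPaths_spec : Claim_equal_indexPaths := by
  intro l _ hPre
  unfold Spec_indexPaths indexPaths indexPaths_alt
  rw [pvFoldBridge l hPre, pvGroupFold]
  simp [List.map_map, Function.comp]
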